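-- pv_equiv track=rewrite | github.com/Andrei-gorinov/Andrei_Gorinov_y-234 | Задание 9/9.1. Вариант 4.py | F
-- ===== SOURCE A (Python) =====
-- def F(matrix, k):
--     count = 0
--     max_el = None
--     for row in matrix:
--         for el in row:
--             if el % k == 0:
--                 count += 1
--                 if max_el is None or el > max_el:
--                     max_el = el
--     return count, max_el
-- ===== SOURCE B (Python) =====
-- def _merge(a, b):
--     c1, m1 = a
--     c2, m2 = b
--     if m1 is None:
--         m = m2
--     elif m2 is None:
--         m = m1
--     else:
--         m = m1 if m1 >= m2 else m2
--     return c1 + c2, m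
--
-- def _seg(row, k):
--     if not row:
--         return 0, None
--     if len(row) == 1:
--         el = row[0]
--         return (1, el) if el % k == 0 else (0, None)
--     mid = len(row) // 2
--     return _merge(_seg(row[:mid], k), _seg(row[mid:], k))
--
-- def F(matrix, k):
--     if not matrix:
--         return 0, None
--     return _merge(_seg(matrix[0], k), F(matrix[1:], k))
-- ===== Notes on version B (the rewrite author's own statement) =====
-- stated objective: alternative
-- what changed: B replaces A's single fused left-to-right loop (maintaining count and running max together) by a divide-and-conquer: each row's (count, max) summary is computed recursively on halves and summaries are combined with an associative merge while recursing over the row list.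
import Mathlib
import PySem

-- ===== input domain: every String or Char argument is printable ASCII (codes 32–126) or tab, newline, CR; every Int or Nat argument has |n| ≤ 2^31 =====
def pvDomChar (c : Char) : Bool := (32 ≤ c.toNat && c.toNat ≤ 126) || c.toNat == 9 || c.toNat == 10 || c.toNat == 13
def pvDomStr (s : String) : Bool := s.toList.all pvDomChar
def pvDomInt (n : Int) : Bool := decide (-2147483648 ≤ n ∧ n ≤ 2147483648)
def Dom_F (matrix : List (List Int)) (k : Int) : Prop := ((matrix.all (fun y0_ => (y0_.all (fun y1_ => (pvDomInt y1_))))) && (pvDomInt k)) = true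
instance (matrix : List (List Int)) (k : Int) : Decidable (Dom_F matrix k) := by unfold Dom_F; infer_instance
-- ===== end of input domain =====

-- B computes each row's (count, max) summary by divide-and-conquer on row halves and
-- combines summaries with an associative merge, recursing over the row list, instead of
-- A's single fused left-to-right loop (objective: alternative).

-- ===== PORT A =====
-- A: one pass, state (count, max_el); 'el % k' is Python's floor-mod.
def F (matrix : List (List Int)) (k : Int) : Int × Option Int :=
  matrix.foldl
    (fun st row =>
      row.foldl
        (fun (st : Int × Option Int) el =>
          if PySem.Int.mod el k = 0 then
            (st.1 + 1,
             match st.2 with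
             | none => some el
             | some m => if m < el then some el else some m)
          else st)
        st)
    (0, none)

-- ===== PORT B =====
-- B helper _merge: combine two (count, max-or-None) summaries.
def pvMerge (a b : Int × Option Int) : Int × Option Int :=
  (a.1 + b.1,
   match a.2, b.2 with
   | none, m2 => m2
   | some m1, none => some m1
   | some m1, some m2 => if m2 ≤ m1 then some m1 else some m2)   -- m1 if m1 >= m2 else m2

-- B helper _seg: divide-and-conquer summary of one row.
-- Python's slices row[:mid] / row[mid:] with 0 ≤ mid ≤ len(row) are exactly take/drop.
def pvSeg (row : List Int) (k : Int) : Int × Option Int :=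
  match row with
  | [] => (0, none)
  | [el] => if PySem.Int.mod el k = 0 then (1, some el) else (0, none)
  | r@(_ :: _ :: _) =>
      let mid := r.length / 2
      pvMerge (pvSeg (r.take mid) k) (pvSeg (r.drop mid) k)
termination_by row.length
decreasing_by
  all_goals rename_i h; subst h; simp [List.length_take, List.length_drop, namedPattern]; omega

-- B: recurse over the rows, merging each row's D&C summary with the rest's.
def F_alt (matrix : List (List Int)) (k : Int) : Int × Option Int :=
  match matrix with
  | [] => (0, none)
  | row :: rest => pvMerge (pvSeg row k) (F_alt rest k)

-- ===== PRECONDITION & SPEC =====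
-- Pre_ excludes k = 0, on which Python's 'el % k' raises ZeroDivisionError (when any element exists).
def Pre_F (matrix : List (List Int)) (k : Int) : Prop := k ≠ 0
instance (matrix : List (List Int)) (k : Int) : Decidable (Pre_F matrix k) := by unfold Pre_F; infer_instance
def pvWitness_F : List (List Int) × Int := ([[3, 4, 6], [9, 5]], 3)
def Spec_F (matrix : List (List Int)) (k : Int) (out : Int × Option Int) : Prop := out = F_alt matrix k
instance (matrix : List (List Int)) (k : Int) (out : Int × Option Int) : Decidable (Spec_F matrix k out) := by unfold Spec_F; infer_instance

-- ===== CLAIM (what is proved, stated in full; the proofs are below) =====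
def Claim_equal_F : Prop := ∀ (matrix : List (List Int)) (k : Int), Dom_F matrix k → Pre_F matrix k → Spec_F matrix k (F matrix k)

-- ===== LEMMAS AND PROOFS =====

-- (count, max) summary of a list: the common normal form of both programs' results.
def pvSummary (ds : List Int) : Int × Option Int :=
  ((ds.length : Int), PySem.List.max? ds (fun x => x))

theorem foldl_max_max (s : List Int) (a b : Int) :
    s.foldl max (max a b) = max a (s.foldl max b) := by
  induction s generalizing b with
  | nil => rfl
  | cons x t ih => simp only [List.foldl_cons, max_assoc, ih]

theorem max?_id_nil : PySem.List.max? ([] : List Int) (fun x => x) = none := rfl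

theorem merge_summary (xs ys : List Int) :
    pvMerge (pvSummary xs) (pvSummary ys) = pvSummary (xs ++ ys) := by
  cases xs with
  | nil => simp [pvMerge, pvSummary, max?_id_nil]
  | cons x t =>
    cases ys with
    | nil => simp [pvMerge, pvSummary, max?_id_nil, PySem.List.max?_id_cons]
    | cons y s =>
      simp only [pvMerge, pvSummary, PySem.List.max?_id_cons, List.cons_append,
        List.length_cons, List.length_append, List.foldl_append, List.foldl_cons,
        Prod.mk.injEq]
      refine ⟨by push_cast; ring, ?_⟩
      rw [foldl_max_max]
      rcases le_or_gt (s.foldl max y) (t.foldl max x) with h | h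
      · rw [if_pos h, max_eq_left h]
      · rw [if_neg (not_le.mpr h), max_eq_right h.le]

theorem seg_eq_summary (row : List Int) (k : Int) :
    pvSeg row k = pvSummary (row.filter (fun el => decide (PySem.Int.mod el k = 0))) := by
  induction row using pvSeg.induct k with
  | case1 => rw [pvSeg]; simp [pvSummary, max?_id_nil]
  | case2 el h => rw [pvSeg]; simp [pvSummary, h, PySem.List.max?_id_cons]
  | case3 el h => rw [pvSeg]; simp [pvSummary, h, max?_id_nil]
  | case4 a b t _mid ih1 ih2 =>
    rw [pvSeg]
    rw [ih1, ih2, merge_summary, ← List.filter_append, List.take_append_drop]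

-- A's step when the element passed the divisibility test.
def pvStep (st : Int × Option Int) (el : Int) : Int × Option Int :=
  (st.1 + 1,
   match st.2 with
   | none => some el
   | some m => if m < el then some el else some m)

theorem foldl_if_filter (p : Int → Bool) (row : List Int) (st : Int × Option Int) :
    row.foldl (fun st el => if p el = true then pvStep st el else st) st
      = (row.filter p).foldl pvStep st := by
  induction row generalizing st with
  | nil => rfl
  | cons x t ih =>
    by_cases h : p x = true <;> simp [h, ih]

theorem foldl_step_some (ds : List Int) (c m : Int) :
    ds.foldl pvStep (c, some m) = (c + ds.length, some (ds.foldl max m)) := by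
  induction ds generalizing c m with
  | nil => simp
  | cons x t ih =>
    simp only [List.foldl_cons, pvStep]
    rcases lt_or_ge m x with h | h
    · rw [if_pos h, ih]
      simp [Prod.ext_iff, max_eq_right h.le]
      ring
    · rw [if_neg (not_lt.mpr h), ih]
      simp [Prod.ext_iff, max_eq_left h]
      ring

theorem foldl_step_none (ds : List Int) :
    ds.foldl pvStep ((0 : Int), none) = pvSummary ds := by
  cases ds with
  | nil => rfl
  | cons x t =>
    simp only [List.foldl_cons, pvStep, foldl_step_some, pvSummary, PySem.List.max?_id_cons]
    simp [Prod.ext_iff]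
    ring

-- A equals the summary of the flattened filtered elements.
theorem F_eq_summary (matrix : List (List Int)) (k : Int) :
    F matrix k
      = pvSummary (matrix.flatMap (fun row => row.filter (fun el => decide (PySem.Int.mod el k = 0)))) := by
  unfold F
  have h1 : matrix.foldl
      (fun st row =>
        row.foldl
          (fun (st : Int × Option Int) el =>
            if PySem.Int.mod el k = 0 then
              (st.1 + 1,
               match st.2 with
               | none => some el
               | some m => if m < el then some el else some m)
            else st)
          st)
      ((0 : Int), none)
      = (matrix.flatMap (fun row => row.filter (fun el => decide (PySem.Int.mod el k = 0)))).foldl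
          pvStep ((0 : Int), none) := by
    rw [List.foldl_flatMap]
    apply PySem.List.foldl_congr_mem
    intro st row hrow
    rw [← foldl_if_filter (fun el => decide (PySem.Int.mod el k = 0)) row st]
    apply PySem.List.foldl_congr_mem
    intro st el hel
    by_cases h : PySem.Int.mod el k = 0 <;> simp [h, pvStep]
  rw [h1, foldl_step_none]

-- B equals the same summary.
theorem F_alt_eq_summary (matrix : List (List Int)) (k : Int) :
    F_alt matrix k
      = pvSummary (matrix.flatMap (fun row => row.filter (fun el => decide (PySem.Int.mod el k = 0)))) := by
  induction matrix with
  | nil => rfl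
  | cons row rest ih =>
    rw [F_alt, ih, seg_eq_summary, merge_summary, List.flatMap_cons]

-- ===== VERDICT (by name: the statement is the Claim_ definition above) =====
theorem F_spec : Claim_equal_F := by
  intro matrix k _ _
  rw [Spec_F, F_eq_summary, F_alt_eq_summary]
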